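-- pv_equiv track=rewrite | github.com/fredbunz-lgtm/aav-itr-pileup | aav_genome_qc.py | find_best_palindrome
-- ===== SOURCE A (Python) =====
-- def rc(s):
--     return s.translate(str.maketrans('ACGTNacgtn', 'TGCANtgcan'))[::-1]
--
-- def find_best_palindrome(s, min_arm=30, max_arm=45, max_mm=3):
--     best = (0, -1, -1, 999)
--     for armlen in range(max_arm, min_arm - 1, -1):
--         for sa in range(0, len(s) - 2 * armlen):
--             arm_a    = s[sa:sa + armlen]
--             arm_a_rc = rc(arm_a)
--             for sb in range(sa + armlen + 1, len(s) - armlen + 1):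
--                 arm_b = s[sb:sb + armlen]
--                 if len(arm_b) < armlen:
--                     continue
--                 mm = sum(x != y for x, y in zip(arm_a_rc, arm_b))
--                 if mm <= max_mm and armlen > best[0]:
--                     best = (armlen, sa, sb, mm)
--         if best[0] >= armlen:
--             break
--     return best
-- ===== SOURCE B (Python) =====
-- def find_best_palindrome(s, min_arm=30, max_arm=45, max_mm=3):
--     n = len(s)
--     comp = {'A': 'T', 'C': 'G', 'G': 'C', 'T': 'A', 'N': 'N',
--             'a': 't', 'c': 'g', 'g': 'c', 't': 'a', 'n': 'n'}
--     cs = [comp.get(c, c) for c in s]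
--     # Mismatches between rc(s[sa:sa+L]) and s[sb:sb+L] all lie on the antidiagonal
--     # d = i + j = sa + sb + L - 1 of the matrix M[i][j] = (comp(s[i]) != s[j]).
--     # sfx[d] holds running sums of M along diagonal d taken from its top column
--     # j1 = min(d, n-1) downwards, grown lazily: sfx[d][t] = sum of M over the
--     # columns j1, j1-1, ..., j1-t+1.  Each candidate pair is then scored by a
--     # difference of two such sums instead of rebuilding rc(arm) and rescanning.
--     sfx = {}
--
--     def window(d, lo, hi):
--         # mismatches on diagonal d at columns lo, ..., hi-1
--         j1 = min(d, n - 1)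
--         ps = sfx.get(d)
--         if ps is None:
--             ps = [0]
--             sfx[d] = ps
--         j = j1 - len(ps) + 1
--         while len(ps) <= j1 - lo + 1:
--             ps.append(ps[-1] + (cs[d - j] != s[j]))
--             j -= 1
--         return ps[j1 - lo + 1] - ps[j1 - hi + 1]
--
--     # Arm lengths below 1 are meaningless, so the search stops at 1.
--     for armlen in range(max_arm, max(min_arm, 1) - 1, -1):
--         for sa in range(0, n - 2 * armlen):
--             for sb in range(sa + armlen + 1, n - armlen + 1):
--                 mm = window(sa + sb + armlen - 1, sb, sb + armlen)
--                 if mm <= max_mm: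
--                     return (armlen, sa, sb, mm)
--     return (0, -1, -1, 999)
-- ===== Notes on version B (the rewrite author's own statement) =====
-- stated objective: alternative
-- what changed: B scores an arm pair by a difference of lazily built, memoized suffix sums of complement-mismatch indicators along the antidiagonal i+j = sa+sb+armlen-1, instead of rebuilding rc(arm_a) and scanning the two arms character by character for every candidate pair, and it returns at the first hit instead of carrying a best-so-far accumulator with a break; arm lengths below 1 (where A's loop can only fall through to the default) are skipped by clamping the lower bound to 1.
import Mathlib
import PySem

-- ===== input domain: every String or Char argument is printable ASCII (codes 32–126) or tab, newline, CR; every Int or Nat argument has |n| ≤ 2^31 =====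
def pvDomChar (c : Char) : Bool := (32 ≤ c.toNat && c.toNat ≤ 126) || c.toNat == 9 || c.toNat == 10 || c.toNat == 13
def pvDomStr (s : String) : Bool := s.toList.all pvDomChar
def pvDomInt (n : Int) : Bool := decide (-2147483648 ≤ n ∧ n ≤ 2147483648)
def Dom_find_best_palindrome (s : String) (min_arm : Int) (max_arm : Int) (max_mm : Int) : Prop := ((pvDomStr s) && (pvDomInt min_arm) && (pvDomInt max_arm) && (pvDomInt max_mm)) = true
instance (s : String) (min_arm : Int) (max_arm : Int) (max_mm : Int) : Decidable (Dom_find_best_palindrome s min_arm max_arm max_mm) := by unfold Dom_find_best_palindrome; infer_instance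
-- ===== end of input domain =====

-- B scores each candidate arm pair by a difference of lazily built, memoized suffix sums of
-- complement-mismatch indicators along antidiagonals, instead of A's per-pair rc-and-rescan,
-- and returns at the first hit instead of carrying a best-so-far accumulator with a break.

-- ===== PORT A =====

-- translate table of rc(): 'ACGTNacgtn' -> 'TGCANtgcan', other characters unchanged
def pvTrA (c : Char) : Char :=
  if c = 'A' then 'T' else if c = 'C' then 'G' else if c = 'G' then 'C'
  else if c = 'T' then 'A' else if c = 'N' then 'N'
  else if c = 'a' then 't' else if c = 'c' then 'g' else if c = 'g' then 'c'
  else if c = 't' then 'a' else if c = 'n' then 'n' else c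

-- rc(s) = s.translate(...)[::-1]
def pvRcA (l : List Char) : List Char := (l.map pvTrA).reverse

-- inner 'for sb in range(...)' loop, updating best
def pvInnerA (cs : List Char) (max_mm armlen sa : Int) (arm_a_rc : List Char) :
    List Int → (Int × Int × Int × Int) → (Int × Int × Int × Int)
  | [], best => best
  | sb :: rest, best =>
      let arm_b := PySem.List.slice cs (some sb) (some (sb + armlen))
      if (arm_b.length : Int) < armlen then
        pvInnerA cs max_mm armlen sa arm_a_rc rest best
      else
        let mm := (arm_a_rc.zip arm_b).foldl
          (fun acc p => acc + (if p.1 ≠ p.2 then (1 : Int) else 0)) 0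
        let best' := if mm ≤ max_mm ∧ armlen > best.1 then (armlen, sa, sb, mm) else best
        pvInnerA cs max_mm armlen sa arm_a_rc rest best'

-- middle 'for sa in range(...)' loop
def pvSaA (cs : List Char) (max_mm armlen : Int) :
    List Int → (Int × Int × Int × Int) → (Int × Int × Int × Int)
  | [], best => best
  | sa :: rest, best =>
      let arm_a := PySem.List.slice cs (some sa) (some (sa + armlen))
      let arm_a_rc := pvRcA arm_a
      let best' := pvInnerA cs max_mm armlen sa arm_a_rc
        (PySem.List.pyRange (sa + armlen + 1) ((cs.length : Int) - armlen + 1) 1) best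
      pvSaA cs max_mm armlen rest best'

-- outer 'for armlen in range(max_arm, min_arm-1, -1)' loop with the break
def pvOuterA (cs : List Char) (max_mm : Int) :
    List Int → (Int × Int × Int × Int) → (Int × Int × Int × Int)
  | [], best => best
  | armlen :: rest, best =>
      let best' := pvSaA cs max_mm armlen
        (PySem.List.pyRange 0 ((cs.length : Int) - 2 * armlen) 1) best
      if best'.1 ≥ armlen then best' else pvOuterA cs max_mm rest best'

def find_best_palindrome (s : String) (min_arm : Int) (max_arm : Int) (max_mm : Int) : List Int :=
  let cs := s.toList
  let best := pvOuterA cs max_mm (PySem.List.pyRange max_arm (min_arm - 1) (-1)) (0, -1, -1, 999)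
  [best.1, best.2.1, best.2.2.1, best.2.2.2]

-- ===== PORT B =====

-- the literal dict 'comp', looked up with comp.get(c, c)
def pvCompB (c : Char) : Char :=
  if c = 'A' then 'T' else if c = 'C' then 'G' else if c = 'G' then 'C'
  else if c = 'T' then 'A' else if c = 'N' then 'N'
  else if c = 'a' then 't' else if c = 'c' then 'g' else if c = 'g' then 'c'
  else if c = 't' then 'a' else if c = 'n' then 'n' else c

-- the 'while len(ps) <= j1 - lo + 1' growth loop of window(), with its trip count as fuel
def pvExtB (cs0 csb : List Char) (d : Int) : ℕ → List Int → Int → List Int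
  | 0, ps, _ => ps
  | f + 1, ps, j =>
      pvExtB cs0 csb d f
        (ps ++ [PySem.List.pyGetD ps (-1) 0 +
          (if PySem.List.pyGetD csb (d - j) ' ' ≠ PySem.List.pyGetD cs0 j ' '
           then (1 : Int) else 0)])
        (j - 1)

-- window(d, lo, hi): lazily grown, memoized suffix sums along diagonal d
def pvWindowB (cs0 csb : List Char) (n : Int) (sfx : PySem.Dict Int (List Int))
    (d lo hi : Int) : Int × PySem.Dict Int (List Int) :=
  let j1 := min d (n - 1)
  let ps0 := (PySem.Dict.get? sfx d).getD [0]
  let fuel := ((j1 - lo + 1) + 1 - (ps0.length : Int)).toNat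
  let ps := pvExtB cs0 csb d fuel ps0 (j1 - (ps0.length : Int) + 1)
  (PySem.List.pyGetD ps (j1 - lo + 1) 0 - PySem.List.pyGetD ps (j1 - hi + 1) 0,
   PySem.Dict.insert sfx d ps)

-- innermost loop: first sb whose score is within max_mm (threading the sfx cache)
def pvInnerB (cs0 csb : List Char) (n max_mm armlen sa : Int) :
    List Int → PySem.Dict Int (List Int) →
    Option (Int × Int × Int × Int) × PySem.Dict Int (List Int)
  | [], sfx => (none, sfx)
  | sb :: rest, sfx =>
      let w := pvWindowB cs0 csb n sfx (sa + sb + armlen - 1) sb (sb + armlen)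
      if w.1 ≤ max_mm then (some (armlen, sa, sb, w.1), w.2)
      else pvInnerB cs0 csb n max_mm armlen sa rest w.2

def pvSaB (cs0 csb : List Char) (n max_mm armlen : Int) :
    List Int → PySem.Dict Int (List Int) →
    Option (Int × Int × Int × Int) × PySem.Dict Int (List Int)
  | [], sfx => (none, sfx)
  | sa :: rest, sfx =>
      let r := pvInnerB cs0 csb n max_mm armlen sa
        (PySem.List.pyRange (sa + armlen + 1) (n - armlen + 1)) sfx
      match r.1 with
      | some x => (some x, r.2)
      | none => pvSaB cs0 csb n max_mm armlen rest r.2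

def pvOuterB (cs0 csb : List Char) (n max_mm : Int) :
    List Int → PySem.Dict Int (List Int) →
    Option (Int × Int × Int × Int) × PySem.Dict Int (List Int)
  | [], sfx => (none, sfx)
  | armlen :: rest, sfx =>
      let r := pvSaB cs0 csb n max_mm armlen (PySem.List.pyRange 0 (n - 2 * armlen)) sfx
      match r.1 with
      | some x => (some x, r.2)
      | none => pvOuterB cs0 csb n max_mm rest r.2

def find_best_palindrome_alt (s : String) (min_arm : Int) (max_arm : Int) (max_mm : Int) : List Int :=
  let cs0 := s.toList
  let n : Int := (cs0.length : Int)
  let csb := cs0.map pvCompB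
  match (pvOuterB cs0 csb n max_mm
      (PySem.List.pyRange max_arm (max min_arm 1 - 1) (-1)) PySem.Dict.empty).1 with
  | some r => [r.1, r.2.1, r.2.2.1, r.2.2.2]
  | none => [0, -1, -1, 999]

-- ===== PRECONDITION & SPEC =====
def Spec_find_best_palindrome (s : String) (min_arm : Int) (max_arm : Int) (max_mm : Int) (out : List Int) : Prop := out = find_best_palindrome_alt s min_arm max_arm max_mm
instance (s : String) (min_arm : Int) (max_arm : Int) (max_mm : Int) (out : List Int) : Decidable (Spec_find_best_palindrome s min_arm max_arm max_mm out) := by unfold Spec_find_best_palindrome; infer_instance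

-- ===== CLAIM (what is proved, stated in full; the proofs are below) =====
def Claim_equal_find_best_palindrome : Prop := ∀ (s : String) (min_arm : Int) (max_arm : Int) (max_mm : Int), Dom_find_best_palindrome s min_arm max_arm max_mm → Spec_find_best_palindrome s min_arm max_arm max_mm (find_best_palindrome s min_arm max_arm max_mm)

-- ===== LEMMAS AND PROOFS =====

-- the two char tables are the same mapping
lemma pvCompB_eq : pvCompB = pvTrA := rfl

lemma pvTrA_space : pvTrA ' ' = ' ' := by decide

-- canonical mismatch indicator on the antidiagonal d = i + j, at column j
def pvIndF (cs : List Char) (d j : Int) : Int :=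
  if pvTrA (PySem.List.pyGetD cs (d - j) ' ') ≠ PySem.List.pyGetD cs j ' ' then 1 else 0

-- canonical mismatch count of the arm pair (sa, sb) of length L
def pvMM (cs : List Char) (sa sb armlen : Int) (L : ℕ) : Int :=
  ((List.range L).map (fun (k : ℕ) => pvIndF cs (sa + sb + armlen - 1) (sb + (k : Int)))).sum

-- suffix sum of the first t indicators of diagonal d, taken from column min d (n-1) downwards
def pvG (cs : List Char) (n d : Int) (t : ℕ) : Int :=
  ((List.range t).map (fun (u : ℕ) => pvIndF cs d (min d (n - 1) - (u : Int)))).sum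

-- the canonical cache entry of diagonal d after m growth steps
def pvList (cs : List Char) (n d : Int) (m : ℕ) : List Int :=
  0 :: (List.range m).map (fun (k : ℕ) => pvG cs n d (k + 1))

-- every cache entry is a canonical pvList
def pvValid (cs : List Char) (n : Int) (sfx : PySem.Dict Int (List Int)) : Prop :=
  ∀ (d : Int) (ps : List Int), PySem.Dict.get? sfx d = some ps → ∃ m : ℕ, ps = pvList cs n d m

lemma pvIndF_eq (cs : List Char) (d j : Int) :
    (if PySem.List.pyGetD (cs.map pvTrA) (d - j) ' ' ≠ PySem.List.pyGetD cs j ' '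
     then (1 : Int) else 0) = pvIndF cs d j := by
  unfold pvIndF
  rw [show (' ' : Char) = pvTrA ' ' from rfl, PySem.List.pyGetD_map, pvTrA_space]

lemma pvList_length (cs : List Char) (n d : Int) (m : ℕ) :
    (pvList cs n d m).length = m + 1 := by simp [pvList]

lemma pvG_succ (cs : List Char) (n d : Int) (m : ℕ) :
    pvG cs n d (m + 1) = pvG cs n d m + pvIndF cs d (min d (n - 1) - (m : Int)) := by
  simp [pvG, List.range_succ]

lemma pvList_succ (cs : List Char) (n d : Int) (m : ℕ) :
    pvList cs n d (m + 1) = pvList cs n d m ++ [pvG cs n d (m + 1)] := by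
  simp [pvList, List.range_succ]

lemma pvList_last (cs : List Char) (n d : Int) (m : ℕ) :
    PySem.List.pyGetD (pvList cs n d m) (-1) 0 = pvG cs n d m := by
  cases m with
  | zero => simp [pvList, pvG]; decide
  | succ m => rw [pvList_succ, PySem.List.pyGetD_neg_one_append_singleton]

lemma pvList_getD (cs : List Char) (n d : Int) (m t : ℕ) (ht : t ≤ m) :
    PySem.List.pyGetD (pvList cs n d m) (t : Int) 0 = pvG cs n d t := by
  rw [PySem.List.pyGetD_natCast]
  cases t with
  | zero => simp [pvList, pvG]
  | succ k =>
    unfold pvList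
    rw [List.getD_cons_succ, List.getD_eq_getElem _ _ (by simp; omega)]
    simp

-- the growth loop turns a canonical entry of depth m into one of depth m + fuel
lemma pvExt_spec (cs : List Char) (n d : Int) : ∀ (f m : ℕ),
    pvExtB cs (cs.map pvTrA) d f (pvList cs n d m) (min d (n - 1) - (m : Int))
    = pvList cs n d (m + f) := by
  intro f
  induction f with
  | zero => intro m; rfl
  | succ f ih =>
    intro m
    show pvExtB cs (cs.map pvTrA) d f _ _ = _
    rw [pvIndF_eq, pvList_last, ← pvG_succ, ← pvList_succ,
      show min d (n - 1) - (m : Int) - 1 = min d (n - 1) - ((m + 1 : ℕ) : Int) from by push_cast; ring,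
      ih (m + 1)]
    congr 1
    omega

lemma pvSumReflect (f : ℕ → Int) : ∀ (L : ℕ),
    ((List.range L).map f).sum = ((List.range L).map (fun k => f (L - 1 - k))).sum := by
  intro L
  induction L with
  | zero => rfl
  | succ L ih =>
    conv_lhs => rw [List.range_succ]
    rw [List.map_append, List.sum_append]
    conv_rhs => rw [List.range_succ_eq_map]
    simp only [List.map_cons, List.sum_cons, List.map_map, Function.comp_def,
      Nat.succ_eq_add_one]
    rw [show ((List.range L).map (fun k => f (L + 1 - 1 - (k + 1)))).sum
        = ((List.range L).map (fun k => f (L - 1 - k))).sum from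
      congrArg List.sum (List.map_congr_left (fun k hk => by
        rw [List.mem_range] at hk; congr 1; omega))]
    rw [← ih]
    simp [add_comm]

lemma pvG_add (cs : List Char) (n d : Int) (t L : ℕ) :
    pvG cs n d (t + L)
    = pvG cs n d t
      + ((List.range L).map (fun (k : ℕ) => pvIndF cs d (min d (n - 1) - (t : Int) - (k : Int)))).sum := by
  unfold pvG
  rw [List.range_add, List.map_append, List.sum_append, List.map_map]
  congr 2
  apply List.map_congr_left
  intro k _
  simp only [Function.comp_apply]
  congr 1
  push_cast
  ring

-- window() returns the canonical score and keeps the cache canonical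
lemma pvWindow_spec (cs : List Char) (n : Int) (sfx : PySem.Dict Int (List Int))
    (d lo hi : Int) (hv : pvValid cs n sfx)
    (hlo : 0 ≤ min d (n - 1) - hi + 1) (hlh : lo ≤ hi) :
    (pvWindowB cs (cs.map pvTrA) n sfx d lo hi).1
      = pvG cs n d (min d (n - 1) - lo + 1).toNat - pvG cs n d (min d (n - 1) - hi + 1).toNat
    ∧ pvValid cs n (pvWindowB cs (cs.map pvTrA) n sfx d lo hi).2 := by
  have hm : ∃ m : ℕ, (PySem.Dict.get? sfx d).getD [0] = pvList cs n d m := by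
    cases hg : PySem.Dict.get? sfx d with
    | none => exact ⟨0, rfl⟩
    | some ps => exact hv d ps hg
  obtain ⟨m, hm⟩ := hm
  unfold pvWindowB
  simp only [hm, pvList_length]
  rw [show min d (n - 1) - ((m + 1 : ℕ) : Int) + 1 = min d (n - 1) - (m : Int) from by push_cast; ring]
  rw [pvExt_spec]
  set j1 := min d (n - 1) with hj1
  set M := m + (j1 - lo + 1 + 1 - ((m + 1 : ℕ) : Int)).toNat with hM
  have h1 : (j1 - lo + 1).toNat ≤ M := by omega
  have h2 : (j1 - hi + 1).toNat ≤ M := by omega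
  constructor
  · rw [show j1 - lo + 1 = (((j1 - lo + 1).toNat : ℕ) : Int) from by omega,
      show j1 - hi + 1 = (((j1 - hi + 1).toNat : ℕ) : Int) from by omega,
      pvList_getD cs n d M _ h1, pvList_getD cs n d M _ h2]
    simp only [Int.toNat_natCast]
  · intro d' ps' hg
    by_cases hd : d' = d
    · subst hd
      rw [PySem.Dict.get?_insert_self] at hg
      exact ⟨M, (Option.some_injective _ hg).symm⟩
    · rw [PySem.Dict.get?_insert_of_ne _ _ hd] at hg
      exact hv d' ps' hg

-- a window over the arm pair (sa, sb) scores exactly the canonical mismatch count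
lemma pvWindowMM (cs : List Char) (n armlen sa sb : Int) (hn : n = (cs.length : Int))
    (h1 : 1 ≤ armlen) (h2 : 0 ≤ sa) (_h3 : sa + armlen + 1 ≤ sb) (h4 : sb + armlen ≤ n)
    (sfx : PySem.Dict Int (List Int)) (hv : pvValid cs n sfx) :
    (pvWindowB cs (cs.map pvTrA) n sfx (sa + sb + armlen - 1) sb (sb + armlen)).1
      = pvMM cs sa sb armlen armlen.toNat
    ∧ pvValid cs n (pvWindowB cs (cs.map pvTrA) n sfx (sa + sb + armlen - 1) sb (sb + armlen)).2 := by
  set d := sa + sb + armlen - 1 with hd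
  have hj1 : min d (n - 1) - (sb + armlen) + 1 ≥ 0 := by omega
  obtain ⟨hval, hv'⟩ := pvWindow_spec cs n sfx d sb (sb + armlen) hv hj1 (by omega)
  refine ⟨?_, hv'⟩
  rw [hval]
  set j1 := min d (n - 1) with hj1e
  have ht : (j1 - sb + 1).toNat = (j1 - (sb + armlen) + 1).toNat + armlen.toNat := by omega
  rw [ht, pvG_add, add_sub_cancel_left]
  rw [show ((j1 - (sb + armlen) + 1).toNat : Int) = j1 - (sb + armlen) + 1 from by omega]
  unfold pvMM
  rw [pvSumReflect (fun k => pvIndF cs (sa + sb + armlen - 1) (sb + (k : Int))) armlen.toNat]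
  apply congrArg List.sum
  apply List.map_congr_left
  intro k hk
  rw [List.mem_range] at hk
  congr 1
  omega

-- ===== A-side lemmas =====

lemma pvZipSum : ∀ (u v : List Char), u.length = v.length →
    ((u.zip v).map (fun p => if p.1 ≠ p.2 then (1 : Int) else 0)).sum
    = ((List.range u.length).map
        (fun k => if u.getD k ' ' ≠ v.getD k ' ' then (1 : Int) else 0)).sum := by
  intro u
  induction u with
  | nil => simp
  | cons x u ih =>
    intro v hv
    cases v with
    | nil => simp at hv
    | cons y v =>
      simp only [List.zip_cons_cons, List.map_cons, List.sum_cons, List.length_cons,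
        List.range_succ_eq_map, List.map_map]
      rw [ih v (by simpa using hv)]
      congr 1

-- A's per-pair score equals the canonical mismatch count
lemma pvMMA (cs : List Char) (sa sb armlen : Int)
    (h1 : 1 ≤ armlen) (h2 : 0 ≤ sa) (h3 : sa + armlen + 1 ≤ sb)
    (h4 : sb + armlen ≤ (cs.length : Int)) :
    ((pvRcA (PySem.List.slice cs (some sa) (some (sa + armlen)))).zip
        (PySem.List.slice cs (some sb) (some (sb + armlen)))).foldl
      (fun acc p => acc + (if p.1 ≠ p.2 then (1 : Int) else 0)) 0
    = pvMM cs sa sb armlen armlen.toNat := by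
  rw [PySem.List.foldl_add, zero_add]
  rw [PySem.List.slice_toNat cs h2 (by omega), PySem.List.slice_toNat cs (by omega) (by omega)]
  have hsa : (sa + armlen).toNat - sa.toNat = armlen.toNat := by omega
  have hsb : (sb + armlen).toNat - sb.toNat = armlen.toNat := by omega
  rw [hsa, hsb]
  have hlu : (pvRcA (List.take armlen.toNat (List.drop sa.toNat cs))).length = armlen.toNat := by
    simp [pvRcA]; omega
  have hlv : (List.take armlen.toNat (List.drop sb.toNat cs)).length = armlen.toNat := by
    simp; omega
  rw [pvZipSum _ _ (by rw [hlu, hlv]), hlu]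
  unfold pvMM
  congr 1
  apply List.map_congr_left
  intro k hk
  rw [List.mem_range] at hk
  have hu : (pvRcA (List.take armlen.toNat (List.drop sa.toNat cs))).getD k ' '
      = pvTrA (cs[sa.toNat + (armlen.toNat - 1 - k)]'(by omega)) := by
    rw [List.getD_eq_getElem _ _ (by omega)]
    simp only [pvRcA, List.getElem_reverse, List.length_map, List.getElem_map,
      List.length_take, List.length_drop, List.getElem_take, List.getElem_drop]
    congr 2
    omega
  have hv : (List.take armlen.toNat (List.drop sb.toNat cs)).getD k ' '
      = cs[sb.toNat + k]'(by omega) := by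
    rw [List.getD_eq_getElem _ _ (by omega)]
    simp [List.getElem_take, List.getElem_drop]
  rw [hu, hv]
  unfold pvIndF
  have e1 : sa + sb + armlen - 1 - (sb + (k : Int))
      = ((sa.toNat + (armlen.toNat - 1 - k) : ℕ) : Int) := by omega
  have e2 : sb + (k : Int) = ((sb.toNat + k : ℕ) : Int) := by omega
  rw [e1, e2, PySem.List.pyGetD_natCast, PySem.List.pyGetD_natCast,
    List.getD_eq_getElem _ _ (by omega), List.getD_eq_getElem _ _ (by omega)]

-- A's inner loop never changes best once best[0] has reached armlen
lemma pvInnerA_preserve (cs : List Char) (max_mm armlen sa : Int) (arc : List Char) :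
    ∀ (l : List Int) (best : Int × Int × Int × Int), armlen ≤ best.1 →
    pvInnerA cs max_mm armlen sa arc l best = best := by
  intro l
  induction l with
  | nil => intro best _; rfl
  | cons sb t ih =>
    intro best h
    simp only [pvInnerA]
    split
    · exact ih best h
    · rw [if_neg (fun hc => absurd hc.2 (by omega))]
      exact ih best h

lemma pvSaA_preserve (cs : List Char) (max_mm armlen : Int) :
    ∀ (l : List Int) (best : Int × Int × Int × Int), armlen ≤ best.1 →
    pvSaA cs max_mm armlen l best = best := by
  intro l
  induction l with
  | nil => intro best _; rfl
  | cons sa t ih =>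
    intro best h
    simp only [pvSaA]
    rw [pvInnerA_preserve _ _ _ _ _ _ _ h]
    exact ih best h

lemma pvInnerB_shape (cs0 csb : List Char) (n max_mm armlen sa : Int) :
    ∀ (l : List Int) (sfx : PySem.Dict Int (List Int)) (r : Int × Int × Int × Int),
    (pvInnerB cs0 csb n max_mm armlen sa l sfx).1 = some r → r.1 = armlen := by
  intro l
  induction l with
  | nil => intro sfx r h; exact absurd h (by simp [pvInnerB])
  | cons sb t ih =>
    intro sfx r h
    simp only [pvInnerB] at h
    split at h
    · cases h; rfl
    · exact ih _ r h

lemma pvSaB_shape (cs0 csb : List Char) (n max_mm armlen : Int) :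
    ∀ (l : List Int) (sfx : PySem.Dict Int (List Int)) (r : Int × Int × Int × Int),
    (pvSaB cs0 csb n max_mm armlen l sfx).1 = some r → r.1 = armlen := by
  intro l
  induction l with
  | nil => intro sfx r h; exact absurd h (by simp [pvSaB])
  | cons sa t ih =>
    intro sfx r h
    simp only [pvSaB] at h
    split at h
    · next heq => cases h; exact pvInnerB_shape _ _ _ _ _ _ _ _ _ heq
    · exact ih _ r h

-- inner loops agree: A's first update is B's first hit
lemma pvInner_eq (cs : List Char) (n max_mm armlen sa : Int) (hn : n = (cs.length : Int))
    (h1 : 1 ≤ armlen) (h2 : 0 ≤ sa) :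
    ∀ (l : List Int), (∀ sb ∈ l, sa + armlen + 1 ≤ sb ∧ sb + armlen ≤ n) →
    ∀ (best : Int × Int × Int × Int), best.1 < armlen →
    ∀ (sfx : PySem.Dict Int (List Int)), pvValid cs n sfx →
    (pvInnerA cs max_mm armlen sa
        (pvRcA (PySem.List.slice cs (some sa) (some (sa + armlen)))) l best
      = (match (pvInnerB cs (cs.map pvTrA) n max_mm armlen sa l sfx).1 with
         | some r => r | none => best))
    ∧ pvValid cs n (pvInnerB cs (cs.map pvTrA) n max_mm armlen sa l sfx).2 := by
  intro l
  induction l with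
  | nil => intro _ best _ sfx hv; exact ⟨rfl, hv⟩
  | cons sb t ih =>
    intro hmem best hb sfx hv
    obtain ⟨hsb1, hsb2⟩ := hmem sb List.mem_cons_self
    obtain ⟨hwv, hv'⟩ := pvWindowMM cs n armlen sa sb hn h1 h2 hsb1 hsb2 sfx hv
    simp only [pvInnerA, pvInnerB]
    have hlen : ¬ (((PySem.List.slice cs (some sb) (some (sb + armlen))).length : Int) < armlen) := by
      rw [PySem.List.slice_toNat cs (by omega) (by omega)]
      simp
      omega
    rw [if_neg hlen]
    rw [pvMMA cs sa sb armlen h1 h2 hsb1 (by omega)]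
    rw [hwv]
    by_cases hmm : pvMM cs sa sb armlen armlen.toNat ≤ max_mm
    · rw [if_pos ⟨hmm, by omega⟩, if_pos hmm]
      exact ⟨pvInnerA_preserve _ _ _ _ _ _ _ (by simp), hv'⟩
    · rw [if_neg (fun hc => hmm hc.1), if_neg hmm]
      exact ih (fun x hx => hmem x (List.mem_cons_of_mem _ hx)) best hb _ hv'

-- middle loops agree
lemma pvSa_eq (cs : List Char) (n max_mm armlen : Int) (hn : n = (cs.length : Int))
    (h1 : 1 ≤ armlen) :
    ∀ (l : List Int), (∀ sa ∈ l, 0 ≤ sa ∧ sa + 2 * armlen < n) →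
    ∀ (sfx : PySem.Dict Int (List Int)), pvValid cs n sfx →
    (pvSaA cs max_mm armlen l (0, -1, -1, 999)
      = (match (pvSaB cs (cs.map pvTrA) n max_mm armlen l sfx).1 with
         | some r => r | none => (0, -1, -1, 999)))
    ∧ pvValid cs n (pvSaB cs (cs.map pvTrA) n max_mm armlen l sfx).2 := by
  intro l
  induction l with
  | nil => intro _ sfx hv; exact ⟨rfl, hv⟩
  | cons sa t ih =>
    intro hmem sfx hv
    obtain ⟨hsa1, hsa2⟩ := hmem sa List.mem_cons_self
    obtain ⟨hin, hv'⟩ := pvInner_eq cs n max_mm armlen sa hn h1 hsa1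
      (PySem.List.pyRange (sa + armlen + 1) (n - armlen + 1))
      (fun sb hsb => by rw [PySem.List.mem_pyRange_one] at hsb; omega)
      (0, -1, -1, 999) (by show (0 : Int) < armlen; omega) sfx hv
    simp only [pvSaA, pvSaB, ← hn]
    rw [hin]
    cases h : (pvInnerB cs (cs.map pvTrA) n max_mm armlen sa
        (PySem.List.pyRange (sa + armlen + 1) (n - armlen + 1)) sfx).1 with
    | some r =>
      simp only
      exact ⟨pvSaA_preserve _ _ _ _ _
        (le_of_eq (pvInnerB_shape _ _ _ _ _ _ _ _ _ h).symm), hv'⟩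
    | none =>
      simp only
      exact ih (fun x hx => hmem x (List.mem_cons_of_mem _ hx)) _ hv'

-- outer loops agree, by countdown induction on armlen
lemma pvOuter_eq (cs : List Char) (max_mm min_arm : Int) :
    ∀ (k : ℕ) (a : Int), (a - (min_arm - 1)).toNat ≤ k →
    ∀ (sfx : PySem.Dict Int (List Int)), pvValid cs (cs.length : Int) sfx →
    pvOuterA cs max_mm (PySem.List.pyRange a (min_arm - 1) (-1)) (0, -1, -1, 999)
    = (match (pvOuterB cs (cs.map pvTrA) (cs.length : Int) max_mm
          (PySem.List.pyRange a (max min_arm 1 - 1) (-1)) sfx).1 with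
       | some r => r | none => (0, -1, -1, 999)) := by
  intro k
  induction k with
  | zero =>
    intro a ha sfx hv
    rw [PySem.List.pyRange_neg_one_eq_nil (by omega), PySem.List.pyRange_neg_one_eq_nil (by omega)]
    rfl
  | succ k ih =>
    intro a ha sfx hv
    by_cases hlo : a ≤ min_arm - 1
    · rw [PySem.List.pyRange_neg_one_eq_nil (by omega), PySem.List.pyRange_neg_one_eq_nil (by omega)]
      rfl
    · rw [PySem.List.pyRange_neg_one_cons (by omega : min_arm - 1 < a)]
      by_cases hpos : 1 ≤ a
      · rw [PySem.List.pyRange_neg_one_cons (by omega : max min_arm 1 - 1 < a)]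
        simp only [pvOuterA, pvOuterB]
        obtain ⟨hsa, hv'⟩ := pvSa_eq cs (cs.length : Int) max_mm a rfl hpos
          (PySem.List.pyRange 0 ((cs.length : Int) - 2 * a))
          (fun sa hsa => by rw [PySem.List.mem_pyRange_one] at hsa; omega) sfx hv
        rw [hsa]
        cases h : (pvSaB cs (cs.map pvTrA) (cs.length : Int) max_mm a
            (PySem.List.pyRange 0 ((cs.length : Int) - 2 * a)) sfx).1 with
        | some r =>
          simp only
          have hr := pvSaB_shape _ _ _ _ _ _ _ _ h
          rw [if_pos (by omega : r.1 ≥ a)]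
        | none =>
          simp only
          rw [if_neg (by show ¬ ((0 : Int) ≥ a); omega)]
          exact ih (a - 1) (by omega) _ hv'
      · rw [PySem.List.pyRange_neg_one_eq_nil (by omega : a ≤ max min_arm 1 - 1)]
        simp only [pvOuterA, pvOuterB]
        rw [pvSaA_preserve _ _ _ _ _ (by show a ≤ (0 : Int); omega)]
        rw [if_pos (by show (0 : Int) ≥ a; omega)]

lemma pvValid_empty (cs : List Char) (n : Int) : pvValid cs n PySem.Dict.empty := by
  intro d ps h
  simp [PySem.Dict.empty, PySem.Dict.get?] at h

-- ===== VERDICT (by name: the statement is the Claim_ definition above) =====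
theorem find_best_palindrome_spec : Claim_equal_find_best_palindrome := by
  unfold Claim_equal_find_best_palindrome Spec_find_best_palindrome
  intro s min_arm max_arm max_mm _
  simp only [find_best_palindrome, find_best_palindrome_alt, pvCompB_eq]
  rw [pvOuter_eq s.toList max_mm min_arm (max_arm - (min_arm - 1)).toNat max_arm le_rfl
    PySem.Dict.empty (pvValid_empty _ _)]
  cases h : (pvOuterB s.toList (s.toList.map pvTrA) (s.toList.length : Int) max_mm
      (PySem.List.pyRange max_arm (max min_arm 1 - 1) (-1)) PySem.Dict.empty).1 with
  | some r => simp
  | none => simp
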